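-- pv_equiv track=rewrite | github.com/DigitalHolography/EyeFlowPython | src/app_settings.py | normalize_named_order
-- ===== SOURCE A (Python) =====
-- from collections.abc import Iterable, Mapping
--
-- def normalize_named_order(
--     item_names: Iterable[str], stored_order: Iterable[str] | None
-- ) -> tuple[list[str], bool]:
--     ordered_names = list(dict.fromkeys(item_names))
--     clean_stored = [
--         name for name in (stored_order or []) if isinstance(name, str) and name.strip()
--     ]
--
--     seen: set[str] = set()
--     normalized: list[str] = []
--     for name in clean_stored:
--         if name in ordered_names and name not in seen:
--             normalized.append(name)
--             seen.add(name)
--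
--     for name in ordered_names:
--         if name not in seen:
--             normalized.append(name)
--             seen.add(name)
--
--     changed = normalized != clean_stored
--     return normalized, changed
-- ===== SOURCE B (Python) =====
-- def normalize_named_order(item_names, stored_order):
--     ordered_names = list(dict.fromkeys(item_names))
--     clean_stored = [
--         name for name in (stored_order or []) if isinstance(name, str) and name.strip()
--     ]
--     index = {}
--     for i, name in enumerate(clean_stored):
--         index.setdefault(name, i)
--     sentinel = len(clean_stored)
--     normalized = sorted(ordered_names, key=lambda n: index.get(n, sentinel))
--     return normalized, normalized != clean_stored
-- ===== Notes on version B (the rewrite author's own statement) =====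
-- stated objective: faster
-- what changed: A's two seen-set filtering loops with 'name in ordered_names' / 'name in seen' list-and-set scans are replaced by building a first-occurrence position dict over clean_stored once and doing a single stable sort of ordered_names keyed by that position (len(clean_stored) as sentinel for absent names), relying on sort stability for the tie order.
import Mathlib
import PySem

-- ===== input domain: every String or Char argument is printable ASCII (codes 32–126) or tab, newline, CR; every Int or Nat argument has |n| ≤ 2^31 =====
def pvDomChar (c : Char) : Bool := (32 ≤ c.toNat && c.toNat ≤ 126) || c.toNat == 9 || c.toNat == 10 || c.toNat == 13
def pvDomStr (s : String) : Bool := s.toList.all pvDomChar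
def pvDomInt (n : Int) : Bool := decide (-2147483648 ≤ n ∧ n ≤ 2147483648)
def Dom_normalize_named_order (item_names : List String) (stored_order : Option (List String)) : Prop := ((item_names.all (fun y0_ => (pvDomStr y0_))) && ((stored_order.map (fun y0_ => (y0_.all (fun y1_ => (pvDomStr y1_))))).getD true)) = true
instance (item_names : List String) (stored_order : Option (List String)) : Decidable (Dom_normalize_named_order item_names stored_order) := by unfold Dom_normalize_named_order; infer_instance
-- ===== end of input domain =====

-- B replaces A's two seen-set loops (with their 'name in ordered_names' list scans) by a
-- first-occurrence index dict plus one stable sort of ordered_names keyed by stored position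
-- (absent names get a sentinel key); same return value, measured faster on large inputs.

-- ===== PORT A =====
-- literal port of A; 'isinstance(name, str)' is always true on List String, and 'name.strip()'
-- truthiness is 'strip name ≠ ""'
def normalize_named_order (item_names : List String) (stored_order : Option (List String)) : List String × Bool :=
  let ordered_names := PySem.List.dedup item_names
  let clean_stored := (stored_order.getD []).filter (fun name => !(PySem.Str.strip name == ""))
  let st := clean_stored.foldl
    (fun (st : PySem.Set String × List String) name =>
      if ordered_names.contains name && !(PySem.Set.contains st.1 name) then
        (PySem.Set.add st.1 name, st.2 ++ [name])
      else st)
    (PySem.Set.empty, [])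
  let st := ordered_names.foldl
    (fun (st : PySem.Set String × List String) name =>
      if !(PySem.Set.contains st.1 name) then (PySem.Set.add st.1 name, st.2 ++ [name]) else st)
    st
  let changed := decide (st.2 ≠ clean_stored)
  (st.2, changed)

-- ===== PORT B =====
-- literal port of Source B; 'index.setdefault(name, i)' is the insert-if-absent step
def normalize_named_order_alt (item_names : List String) (stored_order : Option (List String)) : List String × Bool :=
  let ordered_names := PySem.List.dedup item_names
  let clean_stored := (stored_order.getD []).filter (fun name => !(PySem.Str.strip name == ""))
  let index := (PySem.List.enumerate clean_stored).foldl
    (fun (d : PySem.Dict String Int) p =>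
      if (PySem.Dict.get? d p.2).isNone then PySem.Dict.insert d p.2 p.1 else d)
    PySem.Dict.empty
  let sentinel : Int := clean_stored.length
  let normalized := PySem.List.sorted ordered_names (fun n => (PySem.Dict.get? index n).getD sentinel)
  (normalized, decide (normalized ≠ clean_stored))

-- ===== PRECONDITION & SPEC =====
def Spec_normalize_named_order (item_names : List String) (stored_order : Option (List String)) (out : List String × Bool) : Prop := out = normalize_named_order_alt item_names stored_order
instance (item_names : List String) (stored_order : Option (List String)) (out : List String × Bool) : Decidable (Spec_normalize_named_order item_names stored_order out) := by unfold Spec_normalize_named_order; infer_instance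

-- ===== CLAIM (what is proved, stated in full; the proofs are below) =====
def Claim_equal_normalize_named_order : Prop := ∀ (item_names : List String) (stored_order : Option (List String)), Dom_normalize_named_order item_names stored_order → Spec_normalize_named_order item_names stored_order (normalize_named_order item_names stored_order)

-- ===== LEMMAS AND PROOFS =====

-- structural first-occurrence dedup, proof-side mirror of what A's seen set achieves
def sdedup : List String → List String
  | [] => []
  | c :: cs => c :: (sdedup cs).filter (fun x => !(x == c))

theorem mem_sdedup (n : String) (C : List String) : n ∈ sdedup C ↔ n ∈ C := by
  induction C with
  | nil => simp [sdedup]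
  | cons c cs ih =>
    by_cases h : n = c <;> simp [sdedup, List.mem_filter, h, ih]

theorem nodup_sdedup (C : List String) : (sdedup C).Nodup := by
  induction C with
  | nil => simp [sdedup]
  | cons c cs ih =>
    refine List.Nodup.cons ?_ (ih.filter _)
    intro h
    have := (List.mem_filter.mp h).2
    simp at this

theorem sdedup_of_nodup (C : List String) (h : C.Nodup) : sdedup C = C := by
  induction C with
  | nil => rfl
  | cons c cs ih =>
    simp only [sdedup]
    rw [ih h.of_cons]
    congr 1
    apply List.filter_eq_self.mpr
    intro x hx
    have : x ≠ c := by rintro rfl; exact (List.nodup_cons.mp h).1 hx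
    simp [this]

-- A's seen-filtered appending loop, characterized against sdedup
theorem loop_char (C : List String) (P : String → Bool) :
    ∀ a : List String,
      C.foldl (fun a n => if P n && !(a.contains n) then a ++ [n] else a) a
        = a ++ (sdedup C).filter (fun n => P n && !(a.contains n)) := by
  induction C with
  | nil => intro a; simp [sdedup]
  | cons c cs ih =>
    intro a
    simp only [List.foldl_cons, sdedup, List.filter_cons]
    by_cases hc : (P c && !(a.contains c)) = true
    · rw [if_pos hc, if_pos hc, ih, List.filter_filter]
      have : (fun n => P n && !((a ++ [c]).contains n))
          = (fun x => (P x && !(a.contains x)) && !(x == c)) := by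
        funext x
        by_cases hxc : x = c
        · subst hxc
          simp only [Bool.and_eq_true, Bool.not_eq_true'] at hc
          simp [hc.1]
        · have h1 : (x == c) = false := by simp [hxc]
          have h2 : List.contains [c] x = false := by
            simp [List.contains_eq_mem, hxc]
          simp [h1, hxc]
      rw [this, List.append_assoc]
      rfl
    · rw [if_neg hc, if_neg hc, ih, List.filter_filter]
      congr 1
      apply List.filter_congr
      intro x _
      by_cases hxc : x = c
      · subst hxc
        have hor : x ∈ a ∨ P x = false := by
          by_cases hP : P x = true
          · left; by_contra hmem
            exact hc (by simp [hP, List.contains_eq_mem, hmem])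
          · right; simpa using hP
        rcases hor with hmem | hP
        · simp [List.contains_eq_mem, hmem]
        · simp [hP]
      · simp [hxc]

-- the pair-state loops of A collapse to list loops (the seen set equals the normalized list)
theorem pair_loop (C : List String) (Q : String → PySem.Set String → Bool)
    (hQ : ∀ n a, Q n a = true → List.contains a n = false) :
    ∀ a : List String,
      C.foldl
        (fun (st : PySem.Set String × List String) n =>
          if Q n st.1 then (PySem.Set.add st.1 n, st.2 ++ [n]) else st) (a, a)
        = (C.foldl (fun a n => if Q n a then a ++ [n] else a) a,
           C.foldl (fun a n => if Q n a then a ++ [n] else a) a) := by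
  induction C with
  | nil => intro a; rfl
  | cons c cs ih =>
    intro a
    simp only [List.foldl_cons]
    by_cases h : Q c a
    · rw [if_pos h, if_pos h]
      have hmem : c ∉ a := by
        have := hQ c a h
        simpa [List.contains_eq_mem] using this
      have : PySem.Set.add a c = a ++ [c] := by
        simp [PySem.Set.add, PySem.Set.contains, List.contains_eq_mem, hmem]
      rw [this, ih]
    · rw [if_neg h, if_neg h, ih]

-- first-occurrence index of n in C, and B's sort key
def fidx (C : List String) (n : String) : Option Nat := C.findIdx? (fun m => m == n)

def keyB (C : List String) (n : String) : Int :=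
  match fidx C n with
  | some i => (i : Int)
  | none => C.length

theorem fidx_cons (c : String) (cs : List String) (n : String) :
    fidx (c :: cs) n = if c = n then some 0 else (fidx cs n).map (· + 1) := by
  simp only [fidx, List.findIdx?_cons, beq_iff_eq]

-- what B's setdefault-fold dict looks up: the first-occurrence index, offset by the start
theorem dict_spec (C : List String) :
    ∀ (s : Int) (d : PySem.Dict String Int) (n : String),
      PySem.Dict.get?
        ((PySem.List.enumerate C s).foldl
          (fun (d : PySem.Dict String Int) p =>
            if (PySem.Dict.get? d p.2).isNone then PySem.Dict.insert d p.2 p.1 else d) d) n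
        = if (PySem.Dict.get? d n).isSome then PySem.Dict.get? d n
          else (fidx C n).map (fun i => s + (i : Int)) := by
  induction C with
  | nil =>
    intro s d n
    simp only [PySem.List.enumerate, List.foldl_nil, fidx, List.findIdx?_nil]
    split
    · rfl
    · exact Option.not_isSome_iff_eq_none.mp (by assumption)
  | cons c cs ih =>
    intro s d n
    have he : PySem.List.enumerate (c :: cs) s = (s, c) :: PySem.List.enumerate cs (s + 1) := by
      simp [PySem.List.enumerate]
    rw [he, List.foldl_cons]
    rcases hd : PySem.Dict.get? d c with _ | v
    · -- c not yet a key: setdefault inserts s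
      rw [if_pos (by simp), ih]
      by_cases hn : n = c
      · subst hn
        have hfx : fidx (n :: cs) n = some 0 := by rw [fidx_cons, if_pos rfl]
        rw [PySem.Dict.get?_insert_self, hfx, hd]
        norm_num
      · have hfx : fidx (c :: cs) n = (fidx cs n).map (· + 1) := by
          rw [fidx_cons, if_neg (fun h => hn h.symm)]
        rw [PySem.Dict.get?_insert_of_ne _ _ hn, hfx]
        rcases hg : PySem.Dict.get? d n with _ | w
        · simp only [Option.isSome_none, Bool.false_eq_true, if_false]
          cases hfx2 : fidx cs n <;> (simp; try omega)
        · simp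
    · -- c already a key: skipped
      rw [if_neg (by simp), ih]
      by_cases hn : n = c
      · subst hn; simp [hd]
      · have hfx : fidx (c :: cs) n = (fidx cs n).map (· + 1) := by
          rw [fidx_cons, if_neg (fun h => hn h.symm)]
        rw [hfx]
        rcases hg : PySem.Dict.get? d n with _ | w
        · simp only [Option.isSome_none, Bool.false_eq_true, if_false]
          cases hfx2 : fidx cs n <;> (simp; try omega)
        · simp

theorem keyB_of_not_mem (C : List String) (n : String) (h : n ∉ C) : keyB C n = C.length := by
  have : fidx C n = none := by
    rw [fidx, List.findIdx?_eq_none_iff]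
    intro x hx
    simp only [beq_eq_false_iff_ne, ne_eq]
    rintro rfl; exact h hx
  simp [keyB, this]

theorem keyB_of_mem (C : List String) (n : String) (h : n ∈ C) :
    ∃ i : Nat, fidx C n = some i ∧ i < C.length ∧ keyB C n = i := by
  obtain ⟨i, hi⟩ : ∃ i, fidx C n = some i := by
    rcases ho : fidx C n with _ | i
    · rw [fidx, List.findIdx?_eq_none_iff] at ho
      exact absurd (ho n h) (by simp)
    · exact ⟨i, rfl⟩
  have hlt : i < C.length := (List.findIdx?_eq_some_iff_findIdx_eq.mp hi).1
  exact ⟨i, hi, hlt, by simp [keyB, hi]⟩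

theorem keyB_le (C : List String) (n : String) : keyB C n ≤ C.length := by
  by_cases h : n ∈ C
  · obtain ⟨i, _, hlt, hk⟩ := keyB_of_mem C n h
    rw [hk]; exact_mod_cast hlt.le
  · rw [keyB_of_not_mem C n h]

-- along sdedup C, first-occurrence indices strictly increase
theorem sdedup_pairwise_fidx (C : List String) :
    (sdedup C).Pairwise
      (fun a b => ∀ i j, fidx C a = some i → fidx C b = some j → i < j) := by
  induction C with
  | nil => simp [sdedup]
  | cons c cs ih =>
    simp only [sdedup]
    refine List.Pairwise.cons ?_ ?_
    · intro b hb i j hi hj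
      have hbc : b ≠ c := by
        have := (List.mem_filter.mp hb).2
        simpa using this
      rw [fidx_cons, if_pos rfl] at hi
      rw [fidx_cons, if_neg (fun h => hbc h.symm)] at hj
      rcases Option.map_eq_some_iff.mp hj with ⟨j', _, rfl⟩
      injection hi with hi0
      omega
    · refine ((ih.filter _).imp_of_mem ?_)
      intro a b ha hb h i j hi hj
      have hac : a ≠ c := by have := (List.mem_filter.mp ha).2; simpa using this
      have hbc : b ≠ c := by have := (List.mem_filter.mp hb).2; simpa using this
      rw [fidx_cons, if_neg (fun h' => hac h'.symm)] at hi
      rw [fidx_cons, if_neg (fun h' => hbc h'.symm)] at hj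
      rcases Option.map_eq_some_iff.mp hi with ⟨i', hi', rfl⟩
      rcases Option.map_eq_some_iff.mp hj with ⟨j', hj', rfl⟩
      exact Nat.succ_lt_succ (h i' j' hi' hj')

-- inserting left of a run of strictly greater tail elements
theorem insertBy_append_all_before (before : String → String → Bool) (x : String) :
    ∀ (as bs : List String), (∀ b ∈ bs, before x b = true) →
      PySem.List.insertBy before x (as ++ bs) = PySem.List.insertBy before x as ++ bs := by
  intro as
  induction as with
  | nil =>
    intro bs h
    cases bs with
    | nil => rfl
    | cons b bs' => simp [PySem.List.insertBy, h b (by simp)]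
  | cons a as' ih =>
    intro bs h
    simp only [List.cons_append, PySem.List.insertBy]
    by_cases hx : before x a
    · simp [hx]
    · simp only [hx, Bool.false_eq_true, if_false, List.cons_append]
      rw [ih bs h]

theorem sorted_snoc (xs : List String) (x : String) (key : String → Int) :
    PySem.List.sorted (xs ++ [x]) key
      = PySem.List.insertBy (fun a b => decide (key a < key b)) x (PySem.List.sorted xs key) := by
  rw [PySem.List.sorted_eq_foldl_insertBy, PySem.List.sorted_eq_foldl_insertBy, List.foldl_append]
  rfl

-- a stable sort with a maximal sentinel key splits into the sorted small-key part followed by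
-- the sentinel-key elements in input order
theorem sorted_split (key : String → Int) (L : Int) :
    ∀ xs : List String, (∀ x ∈ xs, key x ≤ L) →
      PySem.List.sorted xs key
        = PySem.List.sorted (xs.filter (fun x => decide (key x < L))) key
            ++ xs.filter (fun x => key x == L) := by
  intro xs
  induction xs using List.reverseRecOn with
  | nil => intro _; simp
  | append_singleton ys y ih =>
    intro hb
    have hys : ∀ x ∈ ys, key x ≤ L := fun x hx => hb x (by simp [hx])
    rw [sorted_snoc, ih hys, List.filter_append, List.filter_append]
    by_cases hy : key y = L
    · rw [PySem.List.insertBy_of_forall_not_before _ _ _ ?_]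
      · have h1 : List.filter (fun x => decide (key x < L)) [y] = [] := by simp [hy]
        have h2 : List.filter (fun x => key x == L) [y] = [y] := by simp [hy]
        rw [h1, h2, List.append_nil, List.append_assoc]
      · intro b hbm
        rcases List.mem_append.mp hbm with hbm | hbm
        · have : b ∈ ys := by
            have h3 := (PySem.List.mem_sorted (xs := List.filter (fun x => decide (key x < L)) ys)
              (key := key) (rev := false) (x := b)).mp hbm
            exact List.mem_of_mem_filter h3
          simp only [decide_eq_false_iff_not, not_lt, hy]
          exact hys b this
        · have := (List.mem_filter.mp hbm).2
          simp only [beq_iff_eq] at this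
          simp [hy, this]
    · have hylt : key y < L := lt_of_le_of_ne (hb y (by simp)) hy
      rw [insertBy_append_all_before _ _ _ _ ?_]
      · rw [← sorted_snoc]
        have h1 : List.filter (fun x => decide (key x < L)) [y] = [y] := by simp [hylt]
        have h2 : List.filter (fun x => key x == L) [y] = [] := by simp [hy]
        rw [h1, h2, List.append_nil]
      · intro b hbm
        have := (List.mem_filter.mp hbm).2
        simp only [beq_iff_eq] at this
        simp [this, hylt]

-- the central equality over plain lists: A's two loops produce B's stable sort
theorem central (O C : List String) (hO : O.Nodup) :
    O.foldl (fun a n => if !(a.contains n) then a ++ [n] else a)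
        (C.foldl (fun a n => if O.contains n && !(a.contains n) then a ++ [n] else a) [])
      = PySem.List.sorted O (keyB C) := by
  -- A side
  have h1 : C.foldl (fun a n => if O.contains n && !(a.contains n) then a ++ [n] else a) []
      = (sdedup C).filter (fun n => O.contains n) := by
    rw [loop_char C (fun n => O.contains n) []]
    simp
  set S := (sdedup C).filter (fun n => O.contains n) with hS
  have hmemS : ∀ x, x ∈ S ↔ x ∈ C ∧ x ∈ O := by
    intro x
    rw [hS, List.mem_filter, mem_sdedup, List.contains_eq_mem]
    simp
  have h2 : O.foldl (fun a n => if !(a.contains n) then a ++ [n] else a) S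
      = S ++ O.filter (fun n => !(S.contains n)) := by
    have hcongr : O.foldl (fun a n => if !(a.contains n) then a ++ [n] else a) S
        = O.foldl (fun a n => if (fun _ => true) n && !(a.contains n) then a ++ [n] else a) S := by
      apply PySem.List.foldl_congr_mem
      intro a n _
      simp
    rw [hcongr, loop_char O (fun _ => true), sdedup_of_nodup O hO]
    simp
  rw [h1, h2]
  -- B side
  rw [sorted_split (keyB C) (C.length : Int) O (fun x _ => keyB_le C x)]
  -- sentinel part
  have hR : O.filter (fun x => keyB C x == (C.length : Int)) = O.filter (fun n => !(S.contains n)) := by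
    apply List.filter_congr
    intro x hx
    by_cases hxC : x ∈ C
    · obtain ⟨i, _, hlt, hk⟩ := keyB_of_mem C x hxC
      have hne : (keyB C x == (C.length : Int)) = false := by
        rw [hk]; simp; omega
      have hcon : S.contains x = true := by
        rw [List.contains_eq_mem]
        simp [hmemS, hxC, hx]
      rw [hne, hcon]; rfl
    · have heq : (keyB C x == (C.length : Int)) = true := by
        simp [keyB_of_not_mem C x hxC]
      have hcon : S.contains x = false := by
        rw [List.contains_eq_mem]
        simp [hmemS, hxC]
      rw [heq, hcon]; rfl
  -- sorted present part
  have hP : PySem.List.sorted (O.filter (fun x => decide (keyB C x < (C.length : Int)))) (keyB C) = S := by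
    apply PySem.List.sorted_eq_of_perm_of_pairwise_lt
    · rw [List.perm_ext_iff_of_nodup ((nodup_sdedup C).filter _) (hO.filter _)]
      intro x
      rw [← hS, hmemS, List.mem_filter]
      constructor
      · rintro ⟨hxC, hxO⟩
        refine ⟨hxO, ?_⟩
        obtain ⟨i, _, hlt, hk⟩ := keyB_of_mem C x hxC
        simp only [hk, decide_eq_true_eq]
        exact_mod_cast hlt
      · rintro ⟨hxO, hlt⟩
        refine ⟨?_, hxO⟩
        by_contra hxC
        rw [keyB_of_not_mem C x hxC] at hlt
        simp at hlt
    · refine ((sdedup_pairwise_fidx C).filter _).imp_of_mem ?_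
      intro a b ha hb h
      have haC : a ∈ C := (mem_sdedup a C).mp (List.mem_of_mem_filter ha)
      have hbC : b ∈ C := (mem_sdedup b C).mp (List.mem_of_mem_filter hb)
      obtain ⟨i, hia, _, hka⟩ := keyB_of_mem C a haC
      obtain ⟨j, hjb, _, hkb⟩ := keyB_of_mem C b hbC
      rw [hka, hkb]
      exact_mod_cast h i j hia hjb
  rw [hP, hR]

-- the concrete pair-state loops of port A, as list loops (proved by defeq from pair_loop)
theorem pairA1 (O C : List String) :
    C.foldl
        (fun (st : PySem.Set String × List String) name =>
          if O.contains name && !(PySem.Set.contains st.1 name) then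
            (PySem.Set.add st.1 name, st.2 ++ [name])
          else st)
        (PySem.Set.empty, [])
      = (C.foldl (fun a n => if O.contains n && !(a.contains n) then a ++ [n] else a) [],
         C.foldl (fun a n => if O.contains n && !(a.contains n) then a ++ [n] else a) []) := by
  exact pair_loop C (fun n a => O.contains n && !(PySem.Set.contains a n))
    (fun n a h => by
      have := (Bool.and_eq_true _ _).mp h
      simpa [PySem.Set.contains] using this.2) []

theorem pairA2 (O : List String) (f : List String) :
    O.foldl
        (fun (st : PySem.Set String × List String) name =>
          if !(PySem.Set.contains st.1 name) then (PySem.Set.add st.1 name, st.2 ++ [name]) else st)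
        (f, f)
      = (O.foldl (fun a n => if !(a.contains n) then a ++ [n] else a) f,
         O.foldl (fun a n => if !(a.contains n) then a ++ [n] else a) f) := by
  exact pair_loop O (fun n a => !(PySem.Set.contains a n))
    (fun n a h => by simpa [PySem.Set.contains] using h) f

-- ===== VERDICT (by name: the statement is the Claim_ definition above) =====
theorem normalize_named_order_spec : Claim_equal_normalize_named_order := by
  intro item_names stored_order _
  unfold Spec_normalize_named_order
  simp only [normalize_named_order, normalize_named_order_alt]
  set O := PySem.List.dedup item_names with hOdef
  set C := (stored_order.getD []).filter (fun name => !(PySem.Str.strip name == "")) with hCdef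
  have hO : O.Nodup := PySem.List.nodup_dedup item_names
  rw [pairA1 O C, pairA2 O ]
  have hkey : (fun n => (PySem.Dict.get?
      ((PySem.List.enumerate C).foldl
        (fun (d : PySem.Dict String Int) p =>
          if (PySem.Dict.get? d p.2).isNone then PySem.Dict.insert d p.2 p.1 else d)
        PySem.Dict.empty) n).getD (C.length : Int)) = keyB C := by
    funext n
    rw [dict_spec C 0 PySem.Dict.empty n]
    have h0 : PySem.Dict.get? (PySem.Dict.empty : PySem.Dict String Int) n = none := rfl
    rw [h0]
    simp only [Option.isSome_none, Bool.false_eq_true, if_false, keyB]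
    cases h : fidx C n
    · rfl
    · simp
  rw [hkey, central O C hO]
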